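-- pv_equiv track=rewrite | github.com/morningred88/-data-structure-algorithms-in-python | EPI/ch5v_boolean_ordering_partition.py | rearrange_boolean_backward_test
-- ===== SOURCE A (Python) =====
-- from typing import List
--
-- def rearrange_boolean_backward_test(A:List[int]) -> List:
--
--     # Initialize the placement position (index) of the 2 subarrays
--     false, true = len(A)-1, len(A)-1
--     for i in reversed(range(0, len(A))):
--         if A[i] == 0:
--             false -= 1
--         else:
--             A[true], A[false] = A[false], A[true]
--             false, true = false - 1, true - 1
--
--     return A
-- ===== SOURCE B (Python) =====
-- from typing import List
--
-- def rearrange_boolean_backward_test(A: List[int]) -> List[int]: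
--     # Stable partition by filtering: zeros first, then the rest, reassigned in place.
--     zeros = [x for x in A if x == 0]
--     rest = [x for x in A if x != 0]
--     A[:] = zeros + rest
--     return A
-- ===== Notes on version B (the rewrite author's own statement) =====
-- stated objective: simpler
-- what changed: Replaces the backward two-pointer in-place swap loop with two filter passes (zeros, non-zeros) concatenated and slice-assigned back.
import Mathlib
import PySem

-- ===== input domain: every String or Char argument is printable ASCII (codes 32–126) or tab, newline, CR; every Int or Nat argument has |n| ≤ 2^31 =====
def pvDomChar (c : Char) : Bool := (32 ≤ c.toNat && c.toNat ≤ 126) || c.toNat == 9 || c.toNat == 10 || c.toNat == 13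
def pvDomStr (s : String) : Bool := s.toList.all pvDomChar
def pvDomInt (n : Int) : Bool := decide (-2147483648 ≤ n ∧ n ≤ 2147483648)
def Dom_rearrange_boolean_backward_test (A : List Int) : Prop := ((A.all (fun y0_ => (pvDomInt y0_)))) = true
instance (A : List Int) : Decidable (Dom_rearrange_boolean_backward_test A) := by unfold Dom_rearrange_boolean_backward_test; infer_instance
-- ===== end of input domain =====

-- B replaces A's backward two-pointer swap loop by two filter passes concatenated (objective: simpler).
-- A mutates its argument in place; the equivalence proved here is about the return value (Source B performs
-- the same in-place reassignment via slice assignment).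

-- ===== PORT A =====
-- one loop iteration: state is (A, false, true); indices are Python ints (pyGetD/pySetD follow Python's
-- negative-index rule; every access A makes is in range, so the defaults are never consulted)
def pvStepA (st : List Int × Int × Int) (i : Int) : List Int × Int × Int :=
  match st with
  | (L, f, t) =>
    if PySem.List.pyGetD L i 0 = 0 then
      (L, f - 1, t)
    else
      -- A[true], A[false] = A[false], A[true]
      let vf := PySem.List.pyGetD L f 0
      let vt := PySem.List.pyGetD L t 0
      (PySem.List.pySetD (PySem.List.pySetD L t vf) f vt, f - 1, t - 1)

def rearrange_boolean_backward_test (A : List Int) : List Int :=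
  let n : Int := (A.length : Int)
  ((PySem.List.pyRange 0 n 1).reverse.foldl pvStepA (A, n - 1, n - 1)).1

-- ===== PORT B =====
def rearrange_boolean_backward_test_alt (A : List Int) : List Int :=
  let zeros := A.filter (fun x => x == 0)
  let rest := A.filter (fun x => !(x == 0))
  zeros ++ rest

-- ===== PRECONDITION & SPEC =====
def Spec_rearrange_boolean_backward_test (A : List Int) (out : List Int) : Prop := out = rearrange_boolean_backward_test_alt A
instance (A : List Int) (out : List Int) : Decidable (Spec_rearrange_boolean_backward_test A out) := by unfold Spec_rearrange_boolean_backward_test; infer_instance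

-- ===== CLAIM (what is proved, stated in full; the proofs are below) =====
def Claim_equal_rearrange_boolean_backward_test : Prop := ∀ (A : List Int), Dom_rearrange_boolean_backward_test A → Spec_rearrange_boolean_backward_test A (rearrange_boolean_backward_test A)

-- ===== LEMMAS AND PROOFS =====

-- zeros of a list are a replicate of 0
lemma filter_zero_eq_replicate (l : List Int) :
    l.filter (fun x => x == 0) = List.replicate (l.countP (fun x => x == 0)) 0 := by
  induction l with
  | nil => simp
  | cons a l ih =>
    by_cases h : a = 0
    · subst h; simp [List.replicate_succ, ih]
    · simp [h, ih]

lemma rep_set (k : Nat) (N : List Int) (a : Int) :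
    ((List.replicate (k+1) (0:Int)) ++ N).set k a = List.replicate k 0 ++ a :: N := by
  induction k with
  | zero => simp
  | succ k ih => simpa [List.replicate_succ] using ih

lemma rep_getD (k : Nat) (N : List Int) :
    ((List.replicate (k+1) (0:Int)) ++ N).getD k 0 = 0 := by
  rw [List.getD_append _ _ _ _ (by simp)]; simp

lemma swap_seg (P : List Int) (a : Int) (z : Nat) (N : List Int) :
    (let L := P ++ a :: (List.replicate z 0 ++ N)
     PySem.List.pySetD (PySem.List.pySetD L ((P.length : Int) + z) (PySem.List.pyGetD L (P.length : Int) 0))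
       (P.length : Int) (PySem.List.pyGetD L ((P.length : Int) + z) 0))
    = P ++ (List.replicate z 0 ++ a :: N) := by
  induction P with
  | cons p P ih =>
    simp only [List.cons_append, List.length_cons]
    have h1 : ((P.length + 1 : Nat) : Int) + z = ((P.length + 1 + z : Nat) : Int) := by push_cast; ring
    have h2 : ((P.length + 1 : Nat) : Int) = ((P.length + 1 : Nat) : Int) := rfl
    rw [h1]
    simp only [PySem.List.pyGetD_natCast, PySem.List.pySetD_natCast]
    have ih' := ih
    rw [show (P.length : Int) + z = ((P.length + z : Nat) : Int) by push_cast; ring] at ih'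
    simp only [PySem.List.pyGetD_natCast, PySem.List.pySetD_natCast] at ih'
    simp only [show P.length + 1 + z = (P.length + z) + 1 by omega, List.getD_cons_succ, List.set_cons_succ]
    rw [ih']
  | nil =>
    simp only [List.nil_append]
    rw [show ((([]:List Int)).length : Int) + z = ((z : Nat) : Int) by simp,
        show ((([]:List Int)).length : Int) = ((0 : Nat) : Int) by simp]
    simp only [PySem.List.pyGetD_natCast, PySem.List.pySetD_natCast]
    cases z with
    | zero => simp
    | succ k =>
      simp only [List.getD_cons_zero, List.set_cons_succ, List.getD_cons_succ]
      rw [rep_getD, rep_set]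
      simp [List.replicate_succ]

lemma loop_inv (A : List Int) :
    ∀ i : Nat, i ≤ A.length →
      ((PySem.List.pyRange 0 (i : Int) 1).reverse.foldl pvStepA
        (A.take i ++ (List.replicate ((A.drop i).countP (fun x => x == 0)) 0
            ++ (A.drop i).filter (fun x => !(x == 0))),
         (i : Int) - 1,
         (i : Int) - 1 + ((A.drop i).countP (fun x => x == 0) : Int))).1
      = List.replicate (A.countP (fun x => x == 0)) 0 ++ A.filter (fun x => !(x == 0)) := by
  intro i
  induction i with
  | zero => intro _; simp [PySem.List.pyRange_one_eq_nil]
  | succ i ih =>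
    intro hle
    have hi : i < A.length := by omega
    have hrange : PySem.List.pyRange 0 ((i+1 : Nat) : Int) 1
        = PySem.List.pyRange 0 (i : Int) 1 ++ [(i : Int)] := by
      rw [show (((i+1 : Nat)) : Int) = (i : Int) + 1 by push_cast; ring]
      exact PySem.List.pyRange_one_succ_right (by positivity)
    rw [hrange, List.reverse_append, List.reverse_singleton, List.singleton_append, List.foldl_cons]
    -- name the tail data
    set a := A[i] with ha
    have hdrop : A.drop i = a :: A.drop (i+1) := List.drop_eq_getElem_cons hi
    have htake : A.take (i+1) = A.take i ++ [a] := by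
      rw [List.take_add_one, List.getElem?_eq_getElem hi]; rfl
    set z := (A.drop (i+1)).countP (fun x => x == 0) with hz
    set N := (A.drop (i+1)).filter (fun x => !(x == 0)) with hN
    have hlen : (A.take i).length = i := List.length_take_of_le (by omega)
    -- evaluate one step
    have hstep : pvStepA
        (A.take (i+1) ++ (List.replicate ((A.drop (i+1)).countP (fun x => x == 0)) 0
            ++ (A.drop (i+1)).filter (fun x => !(x == 0))),
         ((i+1 : Nat) : Int) - 1,
         ((i+1 : Nat) : Int) - 1 + ((A.drop (i+1)).countP (fun x => x == 0) : Int))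
        ((i : Nat) : Int)
        = (A.take i ++ (List.replicate ((A.drop i).countP (fun x => x == 0)) 0
            ++ (A.drop i).filter (fun x => !(x == 0))),
           (i : Int) - 1,
           (i : Int) - 1 + ((A.drop i).countP (fun x => x == 0) : Int)) := by
      rw [htake, ← hz, ← hN]
      have hidx : ((i+1 : Nat) : Int) - 1 = ((i : Nat) : Int) := by push_cast; ring
      have hL : (A.take i ++ [a]) ++ (List.replicate z 0 ++ N)
          = A.take i ++ a :: (List.replicate z 0 ++ N) := by simp
      have hget : PySem.List.pyGetD ((A.take i ++ [a]) ++ (List.replicate z 0 ++ N)) ((i : Nat) : Int) 0 = a := by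
        rw [PySem.List.pyGetD_natCast, List.getD_append _ _ _ _ (by simp [hlen]),
            List.getD_append_right _ _ _ _ (by omega)]
        simp [hlen]
      by_cases hA : a = 0
      · have hzc : (A.drop i).countP (fun x => x == 0) = z + 1 := by
          rw [hdrop, List.countP_cons]; simp [hA, hz]
        have hNc : (A.drop i).filter (fun x => !(x == 0)) = N := by
          rw [hdrop, List.filter_cons]; simp [hA, hN]
        simp only [pvStepA]
        rw [if_pos (by rw [hget]; exact hA)]
        rw [hzc, hNc]
        simp only [Prod.mk.injEq]
        refine ⟨?_, ?_, ?_⟩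
        · rw [hL, hA]; simp [List.replicate_succ]
        · push_cast; ring
        · push_cast; ring
      · have hzc : (A.drop i).countP (fun x => x == 0) = z := by
          rw [hdrop, List.countP_cons]; simp [hA, hz]
        have hNc : (A.drop i).filter (fun x => !(x == 0)) = a :: N := by
          rw [hdrop, List.filter_cons]; simp [hA, hN]
        simp only [pvStepA]
        rw [if_neg (by rw [hget]; exact hA)]
        rw [hzc, hNc]
        simp only [Prod.mk.injEq]
        refine ⟨?_, ?_, ?_⟩
        · rw [hidx, hL, show ((i : Nat) : Int) = ((A.take i).length : Int) by rw [hlen]]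
          exact swap_seg (A.take i) a z N
        · push_cast; ring
        · push_cast; ring
    rw [hstep]
    exact ih (by omega)

-- ===== VERDICT (by name: the statement is the Claim_ definition above) =====
theorem rearrange_boolean_backward_test_spec : Claim_equal_rearrange_boolean_backward_test := by
  intro A _
  unfold Spec_rearrange_boolean_backward_test rearrange_boolean_backward_test rearrange_boolean_backward_test_alt
  have h := loop_inv A A.length (le_refl _)
  simp only [List.take_length, List.drop_length] at h
  simp only []
  rw [show ((A.length : Int) - 1) = ((A.length : Int) - 1 + ((0 : Nat) : Int)) by simp] at h
  simpa [filter_zero_eq_replicate] using h
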